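-- pv_equiv track=rewrite | github.com/somyeong0623/JAVA_AlgorithmStudy | src/week11/programmers_SecretMap/CJW.py | solution
-- ===== SOURCE A (Python) =====
-- def solution(n, arr1, arr2):
--     map_data = [[0 for _ in range(n)] for _ in range(n)]
--     for i in range(n):
--         for j in range(n):
--             map_data[i][j] |= ((arr1[i] % 2) | (arr2[i] % 2))
--             arr1[i] >>= 1
--             arr2[i] >>= 1
--         map_data[i].reverse()
--     map_data = [''.join(['#' if i == 1 else ' ' for i in j]) for j in map_data]
--     return map_data
-- ===== SOURCE B (Python) =====
-- def solution(n, arr1, arr2):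
--     tbl = str.maketrans('10', '# ')
--     return [format((arr1[i] | arr2[i]) & ((1 << n) - 1), 'b').zfill(n).translate(tbl)
--             for i in range(n)]
-- ===== Notes on version B (the rewrite author's own statement) =====
-- stated objective: simpler
-- what changed: A builds a zero matrix and runs an inner per-bit loop that destructively shifts arr1[i] and arr2[i], ORing one bit per cell, then reverses each row and joins in a second pass; B does one integer OR per row, masks it to the low n bits, converts it with format(v,'b').zfill(n) and maps '1'/'0' to '#'/' ' with str.translate - no per-bit Python loop, no reverse, no mutation.
import Mathlib
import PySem

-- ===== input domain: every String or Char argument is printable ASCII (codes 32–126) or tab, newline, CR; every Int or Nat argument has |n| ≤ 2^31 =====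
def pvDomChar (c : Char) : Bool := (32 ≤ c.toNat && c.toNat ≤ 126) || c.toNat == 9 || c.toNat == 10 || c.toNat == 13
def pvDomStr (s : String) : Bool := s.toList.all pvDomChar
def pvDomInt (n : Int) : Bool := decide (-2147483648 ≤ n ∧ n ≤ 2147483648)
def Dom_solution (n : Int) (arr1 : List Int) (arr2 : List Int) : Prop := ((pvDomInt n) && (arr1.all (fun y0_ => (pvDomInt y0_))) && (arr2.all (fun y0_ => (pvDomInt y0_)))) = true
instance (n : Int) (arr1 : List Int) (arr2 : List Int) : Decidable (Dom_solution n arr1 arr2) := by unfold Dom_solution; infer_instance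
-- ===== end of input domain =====

-- B replaces A's per-bit loop (mutating shifts of BOTH arrays, per-cell OR, row reverse, join pass)
-- by: one integer OR per row, mask to the low n bits, format as a binary string, zfill, translate
-- '1'/'0' to '#'/' ' (objective: simpler). A mutates arr1/arr2 in place (shifts them to 0); B does
-- not: the equivalence proved here is about the RETURN value only.

-- ===== PORT A =====
-- one inner-loop iteration of A: append ((arr1[i]%2) | (arr2[i]%2)) (OR'd onto the 0 cell), shift both
def solnRowStep (s : List Int × Int × Int) : List Int × Int × Int :=
  (s.1 ++ [PySem.Int.bor 0 (PySem.Int.bor (PySem.Int.mod s.2.1 2) (PySem.Int.mod s.2.2 2))],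
   s.2.1 >>> (1 : Nat), s.2.2 >>> (1 : Nat))

def solution (n : Int) (arr1 : List Int) (arr2 : List Int) : List String :=
  (((PySem.List.pyRange 0 n 1).map (fun i =>
    ((PySem.List.pyRange 0 n 1).foldl (fun s _ => solnRowStep s)
      ([], PySem.List.pyGetD arr1 i 0, PySem.List.pyGetD arr2 i 0)).1.reverse))).map
    (fun row => String.ofList (row.map (fun x => if x == 1 then '#' else ' ')))

-- ===== PORT B =====
-- format((arr1[i] | arr2[i]) & ((1 << n) - 1), 'b').zfill(n).translate({'1'→'#', '0'→' '})
def solution_alt (n : Int) (arr1 : List Int) (arr2 : List Int) : List String :=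
  (PySem.List.pyRange 0 n 1).map (fun i =>
    String.ofList ((PySem.Chars.zfill
        (PySem.Int.toBinChars
          (PySem.Int.band
            (PySem.Int.bor (PySem.List.pyGetD arr1 i 0) (PySem.List.pyGetD arr2 i 0))
            ((1 <<< n.toNat) - 1))) n).map
      (fun c => if c = '1' then '#' else if c = '0' then ' ' else c)))

-- ===== PRECONDITION & SPEC =====
-- Pre_ excludes exactly the inputs where Python A raises IndexError (n rows demanded of shorter lists).
def Pre_solution (n : Int) (arr1 : List Int) (arr2 : List Int) : Prop :=
  n ≤ (arr1.length : Int) ∧ n ≤ (arr2.length : Int)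
instance (n : Int) (arr1 : List Int) (arr2 : List Int) : Decidable (Pre_solution n arr1 arr2) := by
  unfold Pre_solution; infer_instance

def pvWitness_solution : Int × List Int × List Int := (2, [9, 30], [30, 1])

def Spec_solution (n : Int) (arr1 : List Int) (arr2 : List Int) (out : List String) : Prop := out = solution_alt n arr1 arr2
instance (n : Int) (arr1 : List Int) (arr2 : List Int) (out : List String) : Decidable (Spec_solution n arr1 arr2 out) := by unfold Spec_solution; infer_instance

-- ===== CLAIM (what is proved, stated in full; the proofs are below) =====
def Claim_equal_solution : Prop := ∀ (n : Int) (arr1 : List Int) (arr2 : List Int), Dom_solution n arr1 arr2 → Pre_solution n arr1 arr2 → Spec_solution n arr1 arr2 (solution n arr1 arr2)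

-- ===== LEMMAS AND PROOFS =====

def pvTb (x : Int) (j : Nat) : Bool := decide (x / ((2 ^ j : Nat) : Int) % 2 = 1)
theorem pvTestBit_div (x j : Nat) : x.testBit j = decide (x / 2 ^ j % 2 = 1) := by
  induction j generalizing x with
  | zero => simp [Nat.testBit_zero]
  | succ j ih =>
    rw [Nat.testBit_add_one, ih, Nat.div_div_eq_div_mul, pow_succ]
    ring_nf

theorem pvTb_nonneg (x : Int) (hx : 0 ≤ x) (j : Nat) : pvTb x j = x.toNat.testBit j := by
  rw [pvTestBit_div, pvTb]
  have h1 : x = ((x.toNat : Nat) : Int) := by omega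
  rw [h1]
  norm_cast

theorem pvDiv_neg (y j : Nat) : ((-(y : Int) - 1) / ((2 ^ j : Nat) : Int)) = -((y / 2 ^ j : Nat) : Int) - 1 := by
  have hc : (0 : Int) < ((2 ^ j : Nat) : Int) := by positivity
  have hyN : 2 ^ j * (y / 2 ^ j) + y % 2 ^ j = y := Nat.div_add_mod y (2 ^ j)
  have hy : (y : Int) = ((y / 2 ^ j : Nat) : Int) * ((2 ^ j : Nat) : Int) + ((y % 2 ^ j : Nat) : Int) := by
    conv_lhs => rw [← hyN]
    push_cast; ring
  have hmod : (0:Int) ≤ ((y % 2 ^ j : Nat) : Int) ∧ ((y % 2 ^ j : Nat) : Int) < ((2 ^ j : Nat) : Int) := by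
    constructor
    · positivity
    · exact_mod_cast Nat.mod_lt y (by positivity)
  have hrw : (-(y : Int) - 1) = (((2 ^ j : Nat) : Int) - 1 - ((y % 2 ^ j : Nat) : Int)) + (-((y / 2 ^ j : Nat) : Int) - 1) * ((2 ^ j : Nat) : Int) := by
    linear_combination -hy
  rw [hrw, Int.add_mul_ediv_right _ _ (by omega), Int.ediv_eq_zero_of_lt (by omega) (by omega)]
  ring

theorem pvTb_neg (y j : Nat) : pvTb (-(y : Int) - 1) j = !(y.testBit j) := by
  rw [pvTestBit_div, pvTb, pvDiv_neg]
  have : 0 ≤ ((y / 2 ^ j : Nat) : Int) := by positivity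
  rcases Nat.mod_two_eq_zero_or_one (y / 2 ^ j) with h | h <;>
    · have h' : ((y / 2 ^ j : Nat) : Int) % 2 = (((y / 2 ^ j) % 2 : Nat) : Int) := by push_cast; ring_nf
      simp only [h] at h'
      rw [show (-((y / 2 ^ j : Nat) : Int) - 1) % 2 = 1 - ((y / 2 ^ j : Nat) : Int) % 2 by omega, h']
      simp [h]

theorem pvAnd_mod_two (m a : Nat) : (m &&& a) % 2 = 1 ↔ (m % 2 = 1 ∧ a % 2 = 1) := by
  have h := Nat.testBit_and m a 0
  simp only [Nat.testBit_zero] at h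
  constructor
  · intro hx; have : decide ((m &&& a) % 2 = 1) = true := by simp [hx]
    rw [h] at this; simp at this; exact this
  · rintro ⟨h1, h2⟩
    have : (decide (m % 2 = 1) && decide (a % 2 = 1)) = true := by simp [h1, h2]
    rw [← h] at this; simpa using this

theorem pvSub_and_testBit (m a j : Nat) :
    (m - (m &&& a)).testBit j = (m.testBit j && !(a.testBit j)) := by
  induction j generalizing m a with
  | zero =>
    have hle : (m &&& a) ≤ m := Nat.and_le_left
    have hand := pvAnd_mod_two m a
    simp only [Nat.testBit_zero]
    rcases Nat.mod_two_eq_zero_or_one m with hm | hm <;>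
      rcases Nat.mod_two_eq_zero_or_one a with ha | ha <;>
      rcases Nat.mod_two_eq_zero_or_one (m &&& a) with hx | hx <;>
      simp [hm, ha, hx] at hand ⊢ <;> omega
  | succ j ih =>
    have hle : (m &&& a) ≤ m := Nat.and_le_left
    have hand := pvAnd_mod_two m a
    have hdiv : (m &&& a) / 2 = m / 2 &&& a / 2 := by
      have := @Nat.shiftRight_and_distrib 1 m a
      simpa [Nat.shiftRight_succ, Nat.shiftRight_zero] using this
    have hhalf : (m - (m &&& a)) / 2 = m / 2 - (m / 2 &&& a / 2) := by
      rw [← hdiv]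
      rcases Nat.mod_two_eq_zero_or_one m with hm | hm <;>
        rcases Nat.mod_two_eq_zero_or_one (m &&& a) with hx | hx <;>
        omega
    rw [Nat.testBit_add_one, Nat.testBit_add_one, Nat.testBit_add_one, hhalf, ih]

theorem pvTb_neg' (x : Int) (hx : x < 0) (j : Nat) : pvTb x j = !((-x - 1).toNat.testBit j) := by
  have h : x = -(((-x - 1).toNat : Nat) : Int) - 1 := by omega
  conv_lhs => rw [h]
  exact pvTb_neg _ _

theorem pvTb_bor (a b : Int) (j : Nat) : pvTb (PySem.Int.bor a b) j = (pvTb a j || pvTb b j) := by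
  unfold PySem.Int.bor
  by_cases ha : 0 ≤ a <;> by_cases hb : 0 ≤ b <;> simp only [ha, hb, if_true, if_false]
  · rw [pvTb_nonneg _ (by positivity), pvTb_nonneg a ha, pvTb_nonneg b hb,
      Int.toNat_natCast, Nat.testBit_or]
  · rw [pvTb_neg' _ (by omega) j, pvTb_nonneg a ha, pvTb_neg' b (by omega) j]
    rw [show (-(-(((-b - 1).toNat - ((-b - 1).toNat &&& a.toNat) : Nat) : Int) - 1) - 1) = (((-b - 1).toNat - ((-b - 1).toNat &&& a.toNat) : Nat) : Int) by ring]
    rw [Int.toNat_natCast, pvSub_and_testBit]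
    cases (-b - 1).toNat.testBit j <;> cases a.toNat.testBit j <;> simp
  · rw [pvTb_neg' _ (by omega) j, pvTb_neg' a (by omega) j, pvTb_nonneg b hb]
    rw [show (-(-(((-a - 1).toNat - ((-a - 1).toNat &&& b.toNat) : Nat) : Int) - 1) - 1) = (((-a - 1).toNat - ((-a - 1).toNat &&& b.toNat) : Nat) : Int) by ring]
    rw [Int.toNat_natCast, pvSub_and_testBit]
    cases (-a - 1).toNat.testBit j <;> cases b.toNat.testBit j <;> simp
  · rw [pvTb_neg' _ (by omega) j, pvTb_neg' a (by omega) j, pvTb_neg' b (by omega) j]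
    rw [show (-(-(((-a - 1).toNat &&& (-b - 1).toNat : Nat) : Int) - 1) - 1) = (((-a - 1).toNat &&& (-b - 1).toNat : Nat) : Int) by ring]
    rw [Int.toNat_natCast, Nat.testBit_and]
    cases (-a - 1).toNat.testBit j <;> cases (-b - 1).toNat.testBit j <;> simp

theorem pvBand_mask (x : Int) (m : Nat) :
    PySem.Int.band x ((1 <<< m) - 1) = x % ((2 ^ m : Nat) : Int) := by
  have hmask : (((1 <<< m : Nat) : Int)) - 1 = ((2 ^ m - 1 : Nat) : Int) := by
    push_cast [Nat.one_shiftLeft, Nat.one_le_two_pow]; ring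
  have hpos : (0 : Int) < ((2 ^ m : Nat) : Int) := by positivity
  rw [hmask]
  unfold PySem.Int.band
  by_cases hx : 0 ≤ x
  · simp only [hx, if_true, show (0 : Int) ≤ ((2 ^ m - 1 : Nat) : Int) by positivity]
    rw [Int.toNat_natCast, Nat.and_two_pow_sub_one_eq_mod]
    have : x = ((x.toNat : Nat) : Int) := by omega
    rw [this, Int.toNat_natCast]
    push_cast
    push_cast; ring
  · simp only [hx, if_false, show (0 : Int) ≤ ((2 ^ m - 1 : Nat) : Int) by positivity, if_true]
    rw [Int.toNat_natCast]
    have hcomm : (2 ^ m - 1) &&& (-x - 1).toNat = (-x - 1).toNat &&& (2 ^ m - 1) := Nat.and_comm _ _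
    rw [hcomm, Nat.and_two_pow_sub_one_eq_mod]
    set y := (-x - 1).toNat with hy
    have hxy : x = -((y : Nat) : Int) - 1 := by omega
    have hyN : 2 ^ m * (y / 2 ^ m) + y % 2 ^ m = y := Nat.div_add_mod y (2 ^ m)
    have hrm : ((y % 2 ^ m : Nat) : Int) < ((2 ^ m : Nat) : Int) := by
      exact_mod_cast Nat.mod_lt y (by positivity)
    have hrw : x = (((2 ^ m : Nat) : Int) - 1 - ((y % 2 ^ m : Nat) : Int)) + (-(((y / 2 ^ m : Nat) : Int)) - 1) * ((2 ^ m : Nat) : Int) := by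
      rw [hxy]
      have hy2 : (y : Int) = ((y / 2 ^ m : Nat) : Int) * ((2 ^ m : Nat) : Int) + ((y % 2 ^ m : Nat) : Int) := by
        conv_lhs => rw [← hyN]
        push_cast; ring
      linear_combination -hy2
    rw [hrw, Int.add_mul_emod_self_right, Int.emod_eq_of_lt (by omega) (by omega)]
    have h1 : y % 2 ^ m < 2 ^ m := Nat.mod_lt _ (by positivity)
    omega

theorem pvTestBit_emod (x : Int) (m j : Nat) (hj : j < m) :
    (x % ((2 ^ m : Nat) : Int)).toNat.testBit j = pvTb x j := by
  have hpos : (0 : Int) < ((2 ^ m : Nat) : Int) := by positivity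
  have hw : 0 ≤ x % ((2 ^ m : Nat) : Int) := Int.emod_nonneg x (by omega)
  rw [← pvTb_nonneg _ hw]
  unfold pvTb
  suffices hfin : x % ((2 ^ m : Nat) : Int) / ((2 ^ j : Nat) : Int) % 2 = x / ((2 ^ j : Nat) : Int) % 2 by rw [hfin]
  have hd : x % ((2 ^ m : Nat) : Int) = x + (-(x / ((2 ^ m : Nat) : Int))) * ((2 ^ m : Nat) : Int) := by
    rw [Int.emod_def]; ring
  have hsplit : ((2 ^ m : Nat) : Int) = ((2 ^ (m - j) : Nat) : Int) * ((2 ^ j : Nat) : Int) := by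
    push_cast
    rw [← pow_add]
    congr 1
    omega
  set q := -(x / ((2 ^ m : Nat) : Int)) with hq
  rw [hd, hsplit, show x + q * (((2 ^ (m - j) : Nat) : Int) * ((2 ^ j : Nat) : Int)) = x + (q * ((2 ^ (m - j) : Nat) : Int)) * ((2 ^ j : Nat) : Int) by ring,
    Int.add_mul_ediv_right _ _ (by positivity)]
  have heven : ∃ k : Int, q * ((2 ^ (m - j) : Nat) : Int) = 2 * k := by
    refine ⟨q * ((2 ^ (m - j - 1) : Nat) : Int), ?_⟩
    have : (2 ^ (m - j) : Nat) = 2 * 2 ^ (m - j - 1) := by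
      rw [← pow_succ']
      congr 1
      omega
    rw [this]
    push_cast
    ring
  obtain ⟨k, hk⟩ := heven
  rw [hk]
  omega

theorem pvCellChar (a b : Int) (j : Nat) :
    (if (PySem.Int.bor 0 (PySem.Int.bor (PySem.Int.mod (a >>> j) 2) (PySem.Int.mod (b >>> j) 2))) == 1 then '#' else ' ')
      = (if pvTb a j || pvTb b j then '#' else ' ') := by
  have hmod : ∀ x : Int, PySem.Int.mod x 2 = x % 2 := by intro x; simp [pysem]
  have hsa : a >>> j = a / ((2 ^ j : Nat) : Int) := by rw [Int.shiftRight_eq_div_pow]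
  have hsb : b >>> j = b / ((2 ^ j : Nat) : Int) := by rw [Int.shiftRight_eq_div_pow]
  rw [hmod, hmod, hsa, hsb]
  unfold pvTb
  rcases Int.emod_two_eq (a / ((2 ^ j : Nat) : Int)) with ha | ha <;>
    rcases Int.emod_two_eq (b / ((2 ^ j : Nat) : Int)) with hb | hb <;>
    rw [ha, hb] <;> decide

def pvBits (v : Nat) : List Char :=
  (if h : 2 ≤ v then pvBits (v / 2) else []) ++ [if v % 2 = 1 then '1' else '0']
decreasing_by exact Nat.div_lt_self (by omega) (by omega)

theorem pvDigitChar (n : Nat) :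
    (n % 2).digitChar = (if n % 2 = 1 then '1' else '0') := by
  rcases Nat.mod_two_eq_zero_or_one n with h | h <;> simp [h, Nat.digitChar]

theorem pvToDigitsCore_eq (f : Nat) : ∀ (n : Nat) (acc : List Char), 0 < f → n < 2 ^ f →
    Nat.toDigitsCore 2 f n acc = pvBits n ++ acc := by
  induction f with
  | zero => intro n acc h; omega
  | succ f ih =>
    intro n acc _ h
    rw [Nat.toDigitsCore]
    by_cases h2 : n / 2 = 0
    · simp only [h2, if_true]
      rw [pvBits, dif_neg (by omega), List.nil_append, pvDigitChar]
      rfl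
    · simp only [h2, if_false]
      have hf : 0 < f := by
        rcases Nat.eq_zero_or_pos f with hf0 | hf0
        · subst hf0; omega
        · exact hf0
      rw [ih (n / 2) _ hf (by rw [pow_succ] at h; omega)]
      conv_rhs => rw [pvBits, dif_pos (by omega : 2 ≤ n)]
      rw [pvDigitChar]
      simp

theorem pvToDigits_eq (n : Nat) : Nat.toDigits 2 n = pvBits n := by
  have : Nat.toDigits 2 n = Nat.toDigitsCore 2 (n + 1) n [] := rfl
  rw [this, pvToDigitsCore_eq (n + 1) n [] (by omega) (by
    calc n < n + 1 := by omega
    _ < 2 ^ (n + 1) := Nat.lt_two_pow_self), List.append_nil]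

theorem pvBits_len (m : Nat) : ∀ v : Nat, v < 2 ^ m → 0 < m → (pvBits v).length ≤ m := by
  induction m with
  | zero => intro v _ h; omega
  | succ m ih =>
    intro v hv _
    rw [pvBits]
    by_cases h2 : 2 ≤ v
    · have hm : 0 < m := by
        rcases Nat.eq_zero_or_pos m with h0 | h0
        · subst h0; omega
        · exact h0
      rw [dif_pos h2]
      have := ih (v / 2) (by rw [pow_succ] at hv; omega) hm
      simp only [List.length_append, List.length_cons, List.length_nil]
      omega
    · rw [dif_neg h2]
      simp

theorem pvBits_chars (v : Nat) : ∀ c ∈ pvBits v, c = '0' ∨ c = '1' := by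
  induction v using Nat.strong_induction_on with
  | _ v ih =>
    intro c hc
    rw [pvBits] at hc
    rcases List.mem_append.mp hc with h | h
    · by_cases h2 : 2 ≤ v
      · rw [dif_pos h2] at h
        exact ih (v / 2) (Nat.div_lt_self (by omega) (by omega)) c h
      · rw [dif_neg h2] at h; simp at h
    · rcases List.mem_singleton.mp h with rfl
      split <;> simp

theorem pvBits_ne_nil (v : Nat) : pvBits v ≠ [] := by
  rw [pvBits]
  simp

theorem pvBits_pad (m : Nat) : ∀ v : Nat, v < 2 ^ m → 0 < m →
    List.replicate (m - (pvBits v).length) '0' ++ pvBits v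
      = (List.range m).map (fun k => if v.testBit (m - 1 - k) then '1' else '0') := by
  induction m with
  | zero => intro v _ h; omega
  | succ m ih =>
    intro v hv _
    rw [List.range_succ, List.map_append, List.map_singleton]
    by_cases h2 : 2 ≤ v
    · have hm : 0 < m := by
        rcases Nat.eq_zero_or_pos m with h0 | h0
        · subst h0; omega
        · exact h0
      have hrec := ih (v / 2) (by rw [pow_succ] at hv; omega) hm
      conv_lhs => rw [pvBits, dif_pos h2]
      have hlen : (pvBits (v / 2) ++ [if v % 2 = 1 then '1' else '0']).length
          = (pvBits (v / 2)).length + 1 := by simp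
      rw [hlen]
      have hsub : m + 1 - ((pvBits (v / 2)).length + 1) = m - (pvBits (v / 2)).length := by omega
      rw [hsub, ← List.append_assoc, hrec]
      congr 1
      · apply List.map_congr_left
        intro k hk
        rw [List.mem_range] at hk
        have : m + 1 - 1 - k = (m - 1 - k) + 1 := by omega
        rw [this, Nat.testBit_add_one]
      · have h0 : m + 1 - 1 - m = 0 := by omega
        rw [h0, Nat.testBit_zero]
        rcases Nat.mod_two_eq_zero_or_one v with h | h <;> simp [h]
    · conv_lhs => rw [pvBits, dif_neg h2]
      simp only [List.nil_append, List.length_cons, List.length_nil]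
      have hz : m + 1 - 1 = m := by omega
      have hmap : (List.range m).map (fun k => if v.testBit (m + 1 - 1 - k) then '1' else '0')
          = List.replicate m '0' := by
        rw [show List.replicate m '0' = (List.range m).map (fun _ => '0') by
          rw [List.map_const']; simp]
        apply List.map_congr_left
        intro k hk
        rw [List.mem_range] at hk
        have hbit : v.testBit (m + 1 - 1 - k) = false := by
          have h1 : m + 1 - 1 - k = (m - 1 - k) + 1 := by omega
          rw [h1, Nat.testBit_add_one, show v / 2 = 0 by omega]
          exact Nat.zero_testBit _
        rw [hbit]
        simp
      rw [hmap]
      congr 1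
      rw [show m + 1 - 1 - m = 0 by omega, Nat.testBit_zero]
      rcases Nat.mod_two_eq_zero_or_one v with h | h <;> simp [h]

theorem pvZfill_bits (m v : Nat) (hm : 0 < m) (hv : v < 2 ^ m) :
    PySem.Chars.zfill (pvBits v) ((m : Nat) : Int)
      = List.replicate (m - (pvBits v).length) '0' ++ pvBits v := by
  have hlen := pvBits_len m v hv hm
  unfold PySem.Chars.zfill
  by_cases hle : ((m : Nat) : Int) ≤ (pvBits v).length
  · rw [if_pos hle]
    have : (pvBits v).length = m := by omega
    rw [this, Nat.sub_self, List.replicate_zero, List.nil_append]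
  · rw [if_neg hle]
    cases hcs : pvBits v with
    | nil => exact absurd hcs (pvBits_ne_nil v)
    | cons c rest =>
      have hc : c = '0' ∨ c = '1' := pvBits_chars v c (by rw [hcs]; simp)
      have hnot : ¬(c = '+' ∨ c = '-') := by rcases hc with h | h <;> simp [h]
      simp only [hnot, if_false]
      rw [show ((m : Nat) : Int).toNat = m by omega]

theorem pvRev_range {γ : Type} (f : Nat → γ) (m : Nat) :
    ((List.range m).map f).reverse = (List.range m).map (fun k => f (m - 1 - k)) := by
  apply List.ext_getElem (by simp)
  intro i h1 h2
  simp [List.getElem_reverse]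

theorem pvRow_eq (m : Nat) (hm : 0 < m) (a b : Int) :
    ((List.range m).map (fun (j : Nat) =>
        PySem.Int.bor 0 (PySem.Int.bor (PySem.Int.mod (a >>> j) 2) (PySem.Int.mod (b >>> j) 2)))).reverse.map
      (fun x => if x == 1 then '#' else ' ')
      = (PySem.Chars.zfill
          (PySem.Int.toBinChars (PySem.Int.band (PySem.Int.bor a b) ((1 <<< m) - 1))) ((m : Nat) : Int)).map
        (fun c => if c = '1' then '#' else if c = '0' then ' ' else c) := by
  have hpos : (0 : Int) < ((2 ^ m : Nat) : Int) := by positivity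
  rw [pvBand_mask]
  set x := PySem.Int.bor a b with hx
  have hw : 0 ≤ x % ((2 ^ m : Nat) : Int) := Int.emod_nonneg x (by omega)
  have hlt : x % ((2 ^ m : Nat) : Int) < ((2 ^ m : Nat) : Int) := Int.emod_lt_of_pos x hpos
  have hvN : (x % ((2 ^ m : Nat) : Int)).toNat < 2 ^ m := by omega
  rw [show PySem.Int.toBinChars (x % ((2 ^ m : Nat) : Int))
      = Nat.toDigits 2 (x % ((2 ^ m : Nat) : Int)).toNat by
    unfold PySem.Int.toBinChars
    rw [if_neg (by omega)]]
  rw [pvToDigits_eq, pvZfill_bits m _ hm hvN, pvBits_pad m _ hvN hm,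
    pvRev_range, List.map_map, List.map_map]
  apply List.map_congr_left
  intro k hk
  rw [List.mem_range] at hk
  simp only [Function.comp]
  rw [pvCellChar a b (m - 1 - k)]
  rw [pvTestBit_emod x m (m - 1 - k) (by omega), pvTb_bor]
  cases pvTb a (m - 1 - k) <;> cases pvTb b (m - 1 - k) <;> rfl

-- characterization of A's inner loop (LSB-first list of cell values)
theorem pvShift_shift (a : Int) (j : Nat) : (a >>> (1 : Nat)) >>> j = a >>> (j + 1) := by
  rw [← Int.shiftRight_add, Nat.add_comm]

theorem pvShift_zero (c : Int) : c >>> (0 : Nat) = c := by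
  simp [Int.shiftRight_eq_div_pow]

theorem pvFoldA {α : Type} (l : List α) (a b : Int) (acc : List Int) :
    (l.foldl (fun s _ => solnRowStep s) (acc, a, b)).1
      = acc ++ (List.range l.length).map (fun (j : Nat) =>
          PySem.Int.bor 0 (PySem.Int.bor (PySem.Int.mod (a >>> j) 2) (PySem.Int.mod (b >>> j) 2))) := by
  induction l generalizing a b acc with
  | nil => simp
  | cons x xs ih =>
    simp only [List.foldl_cons, List.length_cons]
    show ((xs.foldl (fun s _ => solnRowStep s) (solnRowStep (acc, a, b)))).1 = _
    rw [show solnRowStep (acc, a, b)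
        = (acc ++ [PySem.Int.bor 0 (PySem.Int.bor (PySem.Int.mod a 2) (PySem.Int.mod b 2))],
           a >>> (1 : Nat), b >>> (1 : Nat)) from rfl, ih]
    rw [List.range_succ_eq_map, List.map_cons, List.map_map, List.append_assoc,
      List.singleton_append]
    refine congrArg (acc ++ ·) (congrArg₂ List.cons ?_ ?_)
    · rw [pvShift_zero, pvShift_zero]
    · refine List.map_congr_left fun j _ => ?_
      simp only [Function.comp_def, pvShift_shift]


-- ===== VERDICT (by name: the statement is the Claim_ definition above) =====
theorem solution_spec : Claim_equal_solution := by
  intro n arr1 arr2 _ _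
  unfold Spec_solution solution solution_alt
  rw [List.map_map]
  apply List.map_congr_left
  intro i hi
  rw [PySem.List.mem_pyRange_one] at hi
  simp only [Function.comp]
  have hm : 0 < n.toNat := by omega
  have hn : ((n.toNat : Nat) : Int) = n := by omega
  rw [pvFoldA, List.nil_append, PySem.List.length_pyRange_one,
    show (n - 0).toNat = n.toNat by omega]
  rw [show n = ((n.toNat : Nat) : Int) from hn.symm] -- present width as a Nat cast
  exact congrArg String.ofList (pvRow_eq n.toNat hm _ _)
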